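-- pv_equiv track=rewrite | github.com/jmvalenz/SOyR | Tarea 2/DiscController (1).py | agregarIndicador
-- ===== SOURCE A (Python) =====
-- def agregarIndicador(info,indicador):
--         lista =[]
--         stri = info
--         while True:
--                 num=stri.find("\n")
--                 if num!=-1:
--                         ##print stri[:num]
--                         lista.append(stri[:num])
--                         stri=stri[(num+1):]
--                 elif stri!="":
--                         lista.append(stri)
--                         break
--                 else:
--                         break
--         ret=""
--         for i in range(0,len(lista)):
--                 ret=ret+indicador+lista[i]+"\n"
--         return ret
-- ===== SOURCE B (Python) =====
-- def agregarIndicador(info, indicador):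
--     if info == "":
--         return ""
--     t = info[:-1] if info.endswith("\n") else info
--     return indicador + t.replace("\n", "\n" + indicador) + "\n"
-- ===== Notes on version B (the rewrite author's own statement) =====
-- stated objective: simpler
-- what changed: Replaces A's manual find-and-slice line-splitting loop plus an index-based join loop with a single loop-free string substitution: strip one trailing newline, replace each remaining "\n" by "\n"+indicador, and wrap with a leading indicador and a final "\n".
import Mathlib
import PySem

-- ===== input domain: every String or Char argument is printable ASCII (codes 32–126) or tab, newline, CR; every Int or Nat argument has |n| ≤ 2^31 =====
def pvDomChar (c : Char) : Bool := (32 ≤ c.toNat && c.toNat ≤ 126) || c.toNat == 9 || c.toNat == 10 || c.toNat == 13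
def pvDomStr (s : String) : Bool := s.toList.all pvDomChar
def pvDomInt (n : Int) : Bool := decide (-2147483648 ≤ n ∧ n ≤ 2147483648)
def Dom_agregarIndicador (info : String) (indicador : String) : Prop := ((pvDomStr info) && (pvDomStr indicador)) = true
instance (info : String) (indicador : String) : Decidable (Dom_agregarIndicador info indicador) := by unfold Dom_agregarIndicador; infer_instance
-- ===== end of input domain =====

-- B replaces A's find-loop-and-join with one string substitution (replace "\n" with "\n"+indicador on the body), for a simpler loop-free implementation.

-- ===== PORT A =====
-- the while-loop of A: scan for "\n", collect lines, keep a nonempty tail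
def agregarIndicadorLoop (stri : String) (lista : List String) : List String :=
  let num := PySem.Str.find stri "\n"
  if h : num ≠ -1 then
    agregarIndicadorLoop (PySem.Str.slice stri (some (num + 1)) none)
      (lista ++ [PySem.Str.slice stri none (some num)])
  else if stri ≠ "" then lista ++ [stri]
  else lista
termination_by stri.toList.length
decreasing_by
  have hfind : PySem.Str.find stri "\n" = PySem.Chars.find stri.toList ['\n'] := rfl
  have h'' : PySem.Str.find stri "\n" ≠ -1 := h
  rw [hfind] at h''
  have h0 : 0 ≤ PySem.Chars.find stri.toList ['\n'] := by
    have := PySem.Chars.neg_one_le_find stri.toList ['\n']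
    omega
  have hne : stri.toList ≠ [] := by
    intro hnil
    apply h''
    rw [hnil]
    decide
  have hlen : 1 ≤ stri.toList.length := List.length_pos_of_ne_nil hne
  have key : ∀ (l : List Char),
      PySem.List.slice l (some (PySem.Chars.find stri.toList ['\n'] + 1)) none
        = l.drop (PySem.Chars.find stri.toList ['\n'] + 1).toNat :=
    fun l => PySem.List.slice_from l (by omega)
  have hsl : stri.length = stri.toList.length := rfl
  simp [PySem.Str.slice, PySem.Chars.slice_eq_listSlice, key]
  omega

def agregarIndicador (info : String) (indicador : String) : String :=
  let lista := agregarIndicadorLoop info []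
  (PySem.List.pyRange 0 (PySem.List.len lista) 1).foldl
    (fun ret i => ret ++ indicador ++ PySem.List.pyGetD lista i "" ++ "\n") ""

-- ===== PORT B =====
def agregarIndicador_alt (info : String) (indicador : String) : String :=
  if info = "" then ""
  else
    let t := if PySem.Str.endswith info "\n" then PySem.Str.slice info none (some (-1)) else info
    indicador ++ PySem.Str.replace t "\n" ("\n" ++ indicador) ++ "\n"

-- ===== PRECONDITION & SPEC =====
def Spec_agregarIndicador (info : String) (indicador : String) (out : String) : Prop := out = agregarIndicador_alt info indicador
instance (info : String) (indicador : String) (out : String) : Decidable (Spec_agregarIndicador info indicador out) := by unfold Spec_agregarIndicador; infer_instance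

-- ===== CLAIM (what is proved, stated in full; the proofs are below) =====
def Claim_equal_agregarIndicador : Prop := ∀ (info : String) (indicador : String), Dom_agregarIndicador info indicador → Spec_agregarIndicador info indicador (agregarIndicador info indicador)

-- ===== LEMMAS AND PROOFS =====

-- elementwise model of str.replace with old = "\n"
def repNl (new : List Char) : List Char → List Char
  | [] => []
  | c :: t => if c = '\n' then new ++ repNl new t else c :: repNl new t

theorem replace_go_eq_repNl (new : List Char) :
    ∀ (fuel : Nat) (l acc : List Char), l.length ≤ fuel →
      PySem.Chars.replace.go ['\n'] new fuel l acc = acc.reverse ++ repNl new l := by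
  intro fuel
  induction fuel with
  | zero =>
    intro l acc h
    have : l = [] := List.length_eq_zero_iff.mp (Nat.le_zero.mp h)
    subst this
    simp [PySem.Chars.replace.go, repNl]
  | succ n ih =>
    intro l acc h
    cases l with
    | nil => simp [PySem.Chars.replace.go, repNl]
    | cons c t =>
      simp only [PySem.Chars.replace.go]
      by_cases hc : c = '\n'
      · subst hc
        have hpre : List.isPrefixOf ['\n'] ('\n' :: t) = true := by
          simp [List.isPrefixOf]
        rw [if_pos hpre]
        simp only [List.length_cons] at h
        rw [ih _ _ (by simpa using Nat.le_of_succ_le_succ h)]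
        simp [repNl]
      · have hpre : List.isPrefixOf ['\n'] (c :: t) = false := by
          simp [List.isPrefixOf]
          exact fun hh => absurd hh.symm hc
        rw [if_neg (by simp [hpre])]
        simp only [List.length_cons] at h
        rw [ih _ _ (Nat.le_of_succ_le_succ h)]
        simp [repNl, hc]

theorem replace_eq_repNl (l new : List Char) :
    PySem.Chars.replace l ['\n'] new = repNl new l := by
  simp only [PySem.Chars.replace]
  rw [if_neg (by simp)]
  simpa using replace_go_eq_repNl new l.length l [] (le_refl _)

theorem repNl_append (new a b : List Char) :
    repNl new (a ++ b) = repNl new a ++ repNl new b := by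
  induction a with
  | nil => simp [repNl]
  | cons c t ih => by_cases hc : c = '\n' <;> simp [repNl, hc, ih]

theorem repNl_of_not_mem (new : List Char) {a : List Char} (h : '\n' ∉ a) :
    repNl new a = a := by
  induction a with
  | nil => simp [repNl]
  | cons c t ih =>
    simp only [List.mem_cons, not_or] at h
    have hc : ¬ c = '\n' := fun e => h.1 e.symm
    simp [repNl, hc, ih h.2]

-- endswith "\n" ↔ getLast? = some '\n'
theorem endswith_nl_iff (l : List Char) :
    PySem.Chars.endswith l ['\n'] = true ↔ l.getLast? = some '\n' := by
  simp only [PySem.Chars.endswith, List.isSuffixOf_iff_suffix]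
  constructor
  · rintro ⟨t, rfl⟩
    simp
  · intro h
    have hne : l ≠ [] := by rintro rfl; simp at h
    refine ⟨l.dropLast, ?_⟩
    have hg : l.getLast hne = '\n' := by
      have h2 := List.getLast?_eq_getLast (l := l) hne
      rw [h2] at h
      exact Option.some.inj h
    rw [← hg]
    exact List.dropLast_concat_getLast hne

-- list-level core of B
def bCore (ind l : List Char) : List Char :=
  if l = [] then []
  else
    ind ++ repNl ('\n' :: ind) (if l.getLast? = some '\n' then l.dropLast else l) ++ ['\n']

theorem alt_toList (info ind : String) :
    (agregarIndicador_alt info ind).toList = bCore ind.toList info.toList := by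
  have hT : ("\n" : String).toList = ['\n'] := by decide
  by_cases h : info = ""
  · subst h; simp [agregarIndicador_alt, bCore]
  · have hne : info.toList ≠ [] := by simpa [String.toList_eq_nil_iff] using h
    by_cases he : PySem.Str.endswith info "\n" = true
    · have he' : PySem.Chars.endswith info.toList ['\n'] = true := by
        simpa [PySem.Str.endswith, hT] using he
      have hg : info.toList.getLast? = some '\n' := (endswith_nl_iff info.toList).mp he'
      simp [agregarIndicador_alt, bCore, h, hne, he', hg, hT, PySem.Str.replace,
        replace_eq_repNl, PySem.Str.slice_to_neg_one, PySem.List.slice_to_neg_one]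
    · have he' : PySem.Chars.endswith info.toList ['\n'] = false := by
        simpa [PySem.Str.endswith, hT] using he
      have hg : ¬ info.toList.getLast? = some '\n' := fun hh =>
        by rw [(endswith_nl_iff info.toList).mpr hh] at he'; cases he'
      simp [agregarIndicador_alt, bCore, h, hne, he', hg, hT, PySem.Str.replace,
        replace_eq_repNl]

theorem bCore_no_nl {l : List Char} (ind : List Char) (h : '\n' ∉ l) (hne : l ≠ []) :
    bCore ind l = ind ++ l ++ ['\n'] := by
  have hg : ¬ l.getLast? = some '\n' := by
    intro hh
    have h1 : l.getLast hne = '\n' := by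
      have h2 := List.getLast?_eq_some_getLast (l := l) hne
      rw [h2] at hh
      exact Option.some.inj hh
    exact h (h1 ▸ List.getLast_mem hne)
  simp [bCore, hne, hg, repNl_of_not_mem _ h]

theorem bCore_split {a : List Char} (ind r : List Char) (ha : '\n' ∉ a) :
    bCore ind (a ++ '\n' :: r) = ind ++ a ++ ['\n'] ++ bCore ind r := by
  cases hr : r with
  | nil =>
    have hg : (a ++ ['\n']).getLast? = some '\n' := by simp
    simp [bCore, hg, repNl_of_not_mem _ ha]
  | cons c t =>
    subst hr
    have hrne : (c :: t : List Char) ≠ [] := by simp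
    have hg1 : (a ++ '\n' :: c :: t).getLast? = (c :: t : List Char).getLast? := by
      rw [List.getLast?_append_of_ne_nil _ (by simp : ('\n' :: c :: t : List Char) ≠ [])]
      rw [show ('\n' :: c :: t : List Char) = ['\n'] ++ (c :: t) from rfl,
        List.getLast?_append_of_ne_nil _ hrne]
    have hdl : (a ++ '\n' :: c :: t).dropLast = a ++ '\n' :: (c :: t : List Char).dropLast := by
      rw [List.dropLast_append_of_ne_nil (by simp : ('\n' :: c :: t : List Char) ≠ [])]
      simp
    by_cases hg : (c :: t : List Char).getLast? = some '\n'
    · simp [bCore, hg1, hdl, hg, hrne, repNl_append, repNl_of_not_mem _ ha, repNl]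
    · simp [bCore, hg1, hg, hrne, repNl_append, repNl_of_not_mem _ ha, repNl]

-- B's recursion, at the String level
theorem alt_empty (ind : String) : agregarIndicador_alt "" ind = "" := by
  simp [agregarIndicador_alt]

theorem alt_no_nl {info : String} (ind : String) (h : '\n' ∉ info.toList) (hne : info ≠ "") :
    agregarIndicador_alt info ind = ind ++ info ++ "\n" := by
  apply String.toList_injective
  rw [alt_toList, bCore_no_nl ind.toList h (by simpa [String.toList_eq_nil_iff] using hne)]
  simp

theorem alt_split {info : String} (ind : String) {a r : List Char}
    (hl : info.toList = a ++ '\n' :: r) (ha : '\n' ∉ a) :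
    agregarIndicador_alt info ind
      = ind ++ String.ofList a ++ "\n" ++ agregarIndicador_alt (String.ofList r) ind := by
  apply String.toList_injective
  rw [alt_toList, hl, bCore_split ind.toList r ha]
  simp [alt_toList]

-- A-side: the output fold
def outFold (ind : String) (xs : List String) : String :=
  xs.foldl (fun ret s => ret ++ ind ++ s ++ "\n") ""

theorem agregarIndicador_eq_outFold (info ind : String) :
    agregarIndicador info ind = outFold ind (agregarIndicadorLoop info []) := by
  simp only [agregarIndicador, outFold]
  exact PySem.List.foldl_pyRange_zero_pyGetD _ "" (fun ret s => ret ++ ind ++ s ++ "\n") ""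

-- find characterization
theorem find_nl_split {stri : String} (h : PySem.Str.find stri "\n" ≠ -1) :
    0 ≤ PySem.Str.find stri "\n" ∧
    stri.toList = stri.toList.take (PySem.Str.find stri "\n").toNat
        ++ '\n' :: stri.toList.drop ((PySem.Str.find stri "\n").toNat + 1) ∧
    '\n' ∉ stri.toList.take (PySem.Str.find stri "\n").toNat := by
  have hsub : ("\n" : String).toList = ['\n'] := by decide
  simp only [PySem.Str.find, hsub] at h ⊢
  have h0 : 0 ≤ PySem.Chars.find stri.toList ['\n'] := by
    have := PySem.Chars.neg_one_le_find stri.toList ['\n']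
    omega
  obtain ⟨hpre, hmin⟩ := PySem.Chars.find_spec (sub := ['\n']) h0
  set n := (PySem.Chars.find stri.toList ['\n']).toNat with hn
  have hlt : n < stri.toList.length := by
    rcases hpre with ⟨t, ht⟩
    by_contra hge
    push_neg at hge
    rw [List.drop_eq_nil_of_le hge] at ht
    simp at ht
  have hdrop : stri.toList.drop n = '\n' :: stri.toList.drop (n + 1) := by
    rcases hpre with ⟨t, ht⟩
    have hd : stri.toList.drop n = '\n' :: ((stri.toList.drop n).tail) := by
      cases hc : stri.toList.drop n with
      | nil => rw [hc] at ht; simp at ht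
      | cons x xs =>
        rw [hc] at ht
        simp at ht
        simp [← ht.1]
    rw [hd, List.tail_drop]
  refine ⟨h0, ?_, ?_⟩
  · conv_lhs => rw [← List.take_append_drop n stri.toList]
    rw [hdrop]
  · intro hmem
    obtain ⟨i, hi, hgi⟩ := List.getElem_of_mem (by simpa using hmem)
    have hile : i < n := by
      simp [List.length_take] at hi
      omega
    apply hmin i hile
    have hilen : i < stri.toList.length := lt_trans hile hlt
    have hgi' : stri.toList[i] = '\n' := by
      have := hgi
      rwa [List.getElem_take] at this
    rw [List.drop_eq_getElem_cons hilen, hgi']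
    exact ⟨_, rfl⟩

-- main induction over A's loop
theorem loop_outFold (ind : String) :
    ∀ (stri : String) (lista : List String),
      outFold ind (agregarIndicadorLoop stri lista)
        = outFold ind lista ++ agregarIndicador_alt stri ind := by
  intro stri
  induction hwf : stri.toList.length using Nat.strong_induction_on generalizing stri with
  | _ n ih =>
  intro lista
  rw [agregarIndicadorLoop.eq_def]
  by_cases h : PySem.Str.find stri "\n" ≠ -1
  · rw [dif_pos h]
    obtain ⟨h0, hsplit, hna⟩ := find_nl_split h
    set num := PySem.Str.find stri "\n" with hnum
    set a := stri.toList.take num.toNat with hadef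
    set r := stri.toList.drop (num.toNat + 1) with hrdef
    have hslice1 : PySem.Str.slice stri (some (num + 1)) none = String.ofList r := by
      apply String.toList_injective
      simp [PySem.Str.slice, PySem.Chars.slice_eq_listSlice,
        PySem.List.slice_from _ (by omega : (0:Int) ≤ num + 1)]
      rw [hrdef]
      congr 1
      omega
    have hslice2 : PySem.Str.slice stri none (some num) = String.ofList a := by
      apply String.toList_injective
      simp [PySem.Str.slice, PySem.Chars.slice_eq_listSlice, PySem.List.slice_to _ h0, hadef]
    have hrlen : (String.ofList r).toList.length < n := by
      have hlen := congrArg List.length hsplit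
      simp only [List.length_append, List.length_cons] at hlen
      have hofl : (String.ofList r).toList = r := by simp
      rw [hofl]
      omega
    rw [hslice1, hslice2, ih _ hrlen _ rfl]
    rw [alt_split ind hsplit hna]
    simp only [outFold, List.foldl_append, List.foldl_cons, List.foldl_nil]
    show (outFold ind lista ++ ind ++ String.ofList a ++ "\n") ++ agregarIndicador_alt (String.ofList r) ind
        = outFold ind lista ++ (ind ++ String.ofList a ++ "\n" ++ agregarIndicador_alt (String.ofList r) ind)
    simp [String.append_assoc]
  · rw [dif_neg h]
    push_neg at h
    have hno : '\n' ∉ stri.toList := by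
      have := (PySem.Chars.find_eq_neg_one_iff stri.toList "\n".toList).mp
        (by simpa [PySem.Str.find] using h)
      intro hmem
      exact this (by
        obtain ⟨i, hi, hgi⟩ := List.getElem_of_mem hmem
        have : ("\n".toList) <+: stri.toList.drop i := by
          rw [List.drop_eq_getElem_cons hi, hgi]
          exact ⟨_, rfl⟩
        exact (PySem.Chars.exists_prefix_drop_iff_isIn _ _).mp ⟨i, this⟩ |>
          fun hin => (PySem.Chars.isIn_iff_infix _ _).mp hin)
    by_cases hne : stri ≠ ""
    · rw [if_pos hne, alt_no_nl ind hno hne]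
      simp only [outFold, List.foldl_append, List.foldl_cons, List.foldl_nil]
      simp [String.append_assoc]
    · push_neg at hne
      rw [if_neg (by simp [hne]), hne, alt_empty]
      simp

-- ===== VERDICT (by name: the statement is the Claim_ definition above) =====
theorem agregarIndicador_spec : Claim_equal_agregarIndicador := by
  intro info ind _
  unfold Spec_agregarIndicador
  rw [agregarIndicador_eq_outFold, loop_outFold]
  simp [outFold]
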